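-- pv_equiv track=rewrite | github.com/IsaBarling/DeepPythonSeminars-3 | HW-3.2.py | generate_item_combinations
-- ===== SOURCE A (Python) =====
-- import itertools
--
-- def generate_item_combinations(items, max_weight):
--     item_combinations = []
--     item_keys = list(items.keys())
--
--     for r in range(1, len(item_keys) + 1):
--         combinations = list(itertools.combinations(item_keys, r))
--         item_combinations.extend(combinations)
--
--     filtered_combinations = []
--
--     for combination in item_combinations:
--         combination_weights = [items[item] for item in combination]
--         if sum(combination_weights) <= max_weight:
--             filtered_combinations.append(combination)
--
--     return filtered_combinations
-- ===== SOURCE B (Python) =====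
-- def generate_item_combinations(items, max_weight):
--     # Backtracking: builds each size-r combination recursively, threading the
--     # running weight, instead of materializing all combinations and re-summing.
--     keys = list(items.keys())
--     result = []
--
--     def helper(need, start, chosen, weight):
--         if need == 0:
--             if weight <= max_weight:
--                 result.append(tuple(chosen))
--             return
--         for j in range(start, len(keys)):
--             helper(need - 1, j + 1, chosen + [keys[j]], weight + items[keys[j]])
--
--     for r in range(1, len(keys) + 1):
--         helper(r, 0, [], 0)
--     return result
-- ===== Notes on version B (the rewrite author's own statement) =====
-- stated objective: alternative
-- what changed: A materializes all combinations with itertools.combinations and then re-sums each one in a second filtering pass; B enumerates combinations by recursive backtracking with the running weight threaded as an accumulator, deciding at each leaf.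
import Mathlib
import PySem

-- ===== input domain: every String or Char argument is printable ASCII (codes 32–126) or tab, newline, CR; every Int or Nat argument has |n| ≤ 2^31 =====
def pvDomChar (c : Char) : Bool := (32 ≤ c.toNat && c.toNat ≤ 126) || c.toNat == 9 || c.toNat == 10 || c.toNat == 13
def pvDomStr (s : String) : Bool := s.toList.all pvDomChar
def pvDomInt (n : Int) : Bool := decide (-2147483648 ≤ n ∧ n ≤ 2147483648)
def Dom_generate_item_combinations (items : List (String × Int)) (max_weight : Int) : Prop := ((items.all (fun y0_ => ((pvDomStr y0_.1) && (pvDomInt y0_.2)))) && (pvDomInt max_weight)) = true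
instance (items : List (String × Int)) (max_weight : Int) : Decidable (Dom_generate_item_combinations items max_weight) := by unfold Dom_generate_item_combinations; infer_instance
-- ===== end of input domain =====

-- B replaces generate-then-filter (itertools.combinations + a second summing pass)
-- with recursive backtracking that threads the running weight as an accumulator
-- and filters at the leaves; same return value, alternative decomposition.


-- ===== PORT A =====
-- itertools.combinations(keys, r) (library call), combinations in the same
-- index-lexicographic order
def pyCombos : Nat → List String → List (List String)
  | 0, _ => [[]]
  | _, [] => []
  | r+1, x :: xs => (pyCombos r xs).map (fun c => x :: c) ++ pyCombos (r+1) xs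

def generate_item_combinations (items : List (String × Int)) (max_weight : Int) : List (List String) :=
  let d := PySem.Dict.ofList items
  let item_keys := d.keys
  -- for r in range(1, len(item_keys)+1): item_combinations.extend(combinations(item_keys, r))
  let item_combinations := (List.range item_keys.length).foldl
    (fun acc r => acc ++ pyCombos (r + 1) item_keys) []
  -- second pass: re-sum each combination and keep it if the total is small enough
  item_combinations.foldl (fun acc combination =>
    let combination_weights := combination.map (fun k => d.getD k 0)
    if combination_weights.sum ≤ max_weight then acc ++ [combination] else acc) []

-- ===== PORT B =====
-- helper(need, start, chosen, weight): backtracking over the key list suffix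
def altRec (d : PySem.Dict String Int) (max_weight : Int) :
    Nat → List String → List String → Int → List (List String)
  | 0, _, chosen, w => if w ≤ max_weight then [chosen] else []
  | _+1, [], _, _ => []
  | need+1, k :: rest, chosen, w =>
      altRec d max_weight need rest (chosen ++ [k]) (w + d.getD k 0) ++
      altRec d max_weight (need + 1) rest chosen w

def generate_item_combinations_alt (items : List (String × Int)) (max_weight : Int) : List (List String) :=
  let d := PySem.Dict.ofList items
  let keys := d.keys
  (List.range keys.length).foldl (fun acc r => acc ++ altRec d max_weight (r + 1) keys [] 0) []

-- ===== PRECONDITION & SPEC =====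
def Spec_generate_item_combinations (items : List (String × Int)) (max_weight : Int) (out : List (List String)) : Prop := out = generate_item_combinations_alt items max_weight
instance (items : List (String × Int)) (max_weight : Int) (out : List (List String)) : Decidable (Spec_generate_item_combinations items max_weight out) := by unfold Spec_generate_item_combinations; infer_instance

-- ===== CLAIM (what is proved, stated in full; the proofs are below) =====
def Claim_equal_generate_item_combinations : Prop := ∀ (items : List (String × Int)) (max_weight : Int), Dom_generate_item_combinations items max_weight → Spec_generate_item_combinations items max_weight (generate_item_combinations items max_weight)

-- ===== LEMMAS AND PROOFS =====

-- backtracking = filter-then-prefix of the combination list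
theorem altRec_eq_filter (d : PySem.Dict String Int) (mw : Int) :
    ∀ (rest : List String) (need : Nat) (chosen : List String) (w : Int),
      altRec d mw need rest chosen w =
        ((pyCombos need rest).filter
          (fun c => decide (w + (c.map (fun k => d.getD k 0)).sum ≤ mw))).map
          (fun c => chosen ++ c) := by
  intro rest
  induction rest with
  | nil =>
      intro need chosen w
      cases need with
      | zero => by_cases h : w ≤ mw <;> simp [altRec, pyCombos, h]
      | succ n => simp [altRec, pyCombos]
  | cons k rest ih =>
      intro need chosen w
      cases need with
      | zero => by_cases h : w ≤ mw <;> simp [altRec, pyCombos, h]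
      | succ n =>
          show altRec d mw n rest (chosen ++ [k]) (w + d.getD k 0) ++
              altRec d mw (n + 1) rest chosen w = _
          rw [ih, ih]
          simp only [pyCombos, List.filter_append, List.map_append,
            List.filter_map, List.map_map]
          congr 1
          rw [List.filter_congr
            (fun c _ => by simp [Function.comp, add_assoc] : ∀ c ∈ pyCombos n rest,
              (decide (w + d.getD k 0 + (List.map (fun k => d.getD k 0) c).sum ≤ mw)) =
              ((fun c => decide (w + (List.map (fun k => d.getD k 0) c).sum ≤ mw)) ∘ fun c => k :: c) c)]
          exact List.map_congr_left (fun c _ => by simp [Function.comp])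

theorem generate_item_combinations_spec : Claim_equal_generate_item_combinations := by
  intro items max_weight _
  unfold Spec_generate_item_combinations generate_item_combinations generate_item_combinations_alt
  simp only [PySem.List.foldl_append_eq_flatMap, List.nil_append,
    PySem.List.foldl_append_ite_eq_filter, List.filter_flatMap,
    altRec_eq_filter]
  congr 1
  funext r
  simp
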